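-- pv_equiv track=rewrite | github.com/MartinPaulEve/mpe-transcribe | src/transcribe/clipboard_content.py | pick_best_target
-- ===== SOURCE A (Python) =====
-- _IMAGE_TYPES = ("image/png", "image/jpeg", "image/bmp", "image/tiff")
--
-- _TEXT_TYPES = (
--     "UTF8_STRING",
--     "text/plain;charset=utf-8",
--     "text/plain",
--     "STRING",
-- )
--
-- def pick_best_target(targets: list[str]) -> str | None:
--     for t in _IMAGE_TYPES:
--         if t in targets:
--             return t
--     for t in _TEXT_TYPES:
--         if t in targets:
--             return t
--     return None
-- ===== SOURCE B (Python) =====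
-- _IMAGE_TYPES = ("image/png", "image/jpeg", "image/bmp", "image/tiff")
--
-- _TEXT_TYPES = (
--     "UTF8_STRING",
--     "text/plain;charset=utf-8",
--     "text/plain",
--     "STRING",
-- )
--
-- _ORDER = _IMAGE_TYPES + _TEXT_TYPES
-- _RANK = {t: i for i, t in enumerate(_ORDER)}
--
-- def pick_best_target(targets: list[str]) -> str | None:
--     best = None
--     for t in targets:
--         r = _RANK.get(t)
--         if r is not None and (best is None or r < best):
--             best = r
--     return None if best is None else _ORDER[best]
-- ===== Notes on version B (the rewrite author's own statement) =====
-- stated objective: faster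
-- what changed: Instead of scanning the fixed priority tuples and testing membership in targets for each (repeated O(len(targets)) list scans), B builds a rank dict once and makes a single pass over targets keeping the minimum rank, then returns the canonical string for that rank.
import Mathlib
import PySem

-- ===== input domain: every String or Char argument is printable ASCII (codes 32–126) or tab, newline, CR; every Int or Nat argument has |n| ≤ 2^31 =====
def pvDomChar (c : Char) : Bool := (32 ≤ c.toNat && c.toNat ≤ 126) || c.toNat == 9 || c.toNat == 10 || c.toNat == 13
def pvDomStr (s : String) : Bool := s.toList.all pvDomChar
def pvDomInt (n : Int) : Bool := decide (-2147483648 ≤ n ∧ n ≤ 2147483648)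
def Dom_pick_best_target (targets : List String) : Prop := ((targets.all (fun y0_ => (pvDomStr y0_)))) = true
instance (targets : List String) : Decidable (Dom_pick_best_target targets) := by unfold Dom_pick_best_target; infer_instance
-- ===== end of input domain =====

-- B replaces A's per-priority membership scans with a rank dict built once and a single pass over targets keeping the minimum rank (alternative decomposition, same result).

-- ===== PORT A =====
def pvImageTypes : List String := ["image/png", "image/jpeg", "image/bmp", "image/tiff"]
def pvTextTypes : List String := ["UTF8_STRING", "text/plain;charset=utf-8", "text/plain", "STRING"]

-- 'for t in TYPES: if t in targets: return t' is find? over the tuple, in order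
def pick_best_target (targets : List String) : Option String :=
  match pvImageTypes.find? (fun t => targets.contains t) with
  | some t => some t
  | none => pvTextTypes.find? (fun t => targets.contains t)

-- ===== PORT B =====
def pvOrder : List String := pvImageTypes ++ pvTextTypes

-- _RANK = {t: i for i, t in enumerate(_ORDER)}
def pvRank : PySem.Dict String Int :=
  (PySem.List.enumerate pvOrder).foldl (fun d p => d.insert p.2 p.1) PySem.Dict.empty

def pick_best_target_alt (targets : List String) : Option String :=
  match targets.foldl (fun best t =>
      match pvRank.get? t with
      | none => best
      | some r =>
        match best with
        | none => some r
        | some b => if r < b then some r else some b) none with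
  | none => none
  | some b => PySem.List.pyGet? pvOrder b

-- ===== PRECONDITION & SPEC =====
def Spec_pick_best_target (targets : List String) (out : Option String) : Prop := out = pick_best_target_alt targets
instance (targets : List String) (out : Option String) : Decidable (Spec_pick_best_target targets out) := by unfold Spec_pick_best_target; infer_instance

-- ===== CLAIM (what is proved, stated in full; the proofs are below) =====
def Claim_equal_pick_best_target : Prop := ∀ (targets : List String), Dom_pick_best_target targets → Spec_pick_best_target targets (pick_best_target targets)

-- ===== LEMMAS AND PROOFS =====

-- min on Option Int, ties kept left (as B's loop keeps the earlier best)
def minOpt : Option Int → Option Int → Option Int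
  | none, o => o
  | some x, none => some x
  | some x, some y => if y < x then some y else some x

-- the smallest priority index present in ts, as nested ifs
def bestIdx (ts : List String) : Option Int :=
  if ts.contains "image/png" then some 0
  else if ts.contains "image/jpeg" then some 1
  else if ts.contains "image/bmp" then some 2
  else if ts.contains "image/tiff" then some 3
  else if ts.contains "UTF8_STRING" then some 4
  else if ts.contains "text/plain;charset=utf-8" then some 5
  else if ts.contains "text/plain" then some 6
  else if ts.contains "STRING" then some 7
  else none

theorem pvRank_eq : pvRank = PySem.Dict.mk
    [("image/png", 0), ("image/jpeg", 1), ("image/bmp", 2), ("image/tiff", 3),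
     ("UTF8_STRING", 4), ("text/plain;charset=utf-8", 5), ("text/plain", 6), ("STRING", 7)] := by
  decide

theorem minOpt_assoc (a b c : Option Int) : minOpt (minOpt a b) c = minOpt a (minOpt b c) := by
  cases a <;> cases b <;> cases c <;> simp only [minOpt] <;> split_ifs <;>
    (try simp only [minOpt]) <;> (try split_ifs) <;> simp_all <;> omega

theorem step_eq (b : Option Int) (t : String) :
    (match pvRank.get? t with
     | none => b
     | some r =>
       match b with
       | none => some r
       | some bb => if r < bb then some r else some bb) = minOpt b (pvRank.get? t) := by
  cases pvRank.get? t <;> cases b <;> simp [minOpt]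

set_option maxHeartbeats 1600000 in
theorem bestIdx_cons (t : String) (ts : List String) :
    bestIdx (t :: ts) = minOpt (pvRank.get? t) (bestIdx ts) := by
  rcases eq_or_ne t "image/png" with h | h0
  · subst h
    have hget : pvRank.get? "image/png" = some 0 := by rw [pvRank_eq]; decide
    rw [hget]; simp [bestIdx]
    split_ifs <;> simp [minOpt]
  rcases eq_or_ne t "image/jpeg" with h | h1
  · subst h
    have hget : pvRank.get? "image/jpeg" = some 1 := by rw [pvRank_eq]; decide
    rw [hget]; simp [bestIdx]
    split_ifs <;> simp [minOpt]
  rcases eq_or_ne t "image/bmp" with h | h2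
  · subst h
    have hget : pvRank.get? "image/bmp" = some 2 := by rw [pvRank_eq]; decide
    rw [hget]; simp [bestIdx]
    split_ifs <;> simp [minOpt]
  rcases eq_or_ne t "image/tiff" with h | h3
  · subst h
    have hget : pvRank.get? "image/tiff" = some 3 := by rw [pvRank_eq]; decide
    rw [hget]; simp [bestIdx]
    split_ifs <;> simp [minOpt]
  rcases eq_or_ne t "UTF8_STRING" with h | h4
  · subst h
    have hget : pvRank.get? "UTF8_STRING" = some 4 := by rw [pvRank_eq]; decide
    rw [hget]; simp [bestIdx]
    split_ifs <;> simp [minOpt]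
  rcases eq_or_ne t "text/plain;charset=utf-8" with h | h5
  · subst h
    have hget : pvRank.get? "text/plain;charset=utf-8" = some 5 := by rw [pvRank_eq]; decide
    rw [hget]; simp [bestIdx]
    split_ifs <;> simp [minOpt]
  rcases eq_or_ne t "text/plain" with h | h6
  · subst h
    have hget : pvRank.get? "text/plain" = some 6 := by rw [pvRank_eq]; decide
    rw [hget]; simp [bestIdx]
    split_ifs <;> simp [minOpt]
  rcases eq_or_ne t "STRING" with h | h7
  · subst h
    have hget : pvRank.get? "STRING" = some 7 := by rw [pvRank_eq]; decide
    rw [hget]; simp [bestIdx]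
    split_ifs <;> simp [minOpt]
  have hget : pvRank.get? t = none := by
    rw [pvRank_eq]
    simp [PySem.Dict.get?, Ne.symm h0, Ne.symm h1, Ne.symm h2, Ne.symm h3,
      Ne.symm h4, Ne.symm h5, Ne.symm h6, Ne.symm h7]
  simp [bestIdx, hget, minOpt, Ne.symm h0, Ne.symm h1, Ne.symm h2, Ne.symm h3,
    Ne.symm h4, Ne.symm h5, Ne.symm h6, Ne.symm h7]

theorem foldl_min (ts : List String) (b : Option Int) :
    ts.foldl (fun best t =>
      match pvRank.get? t with
      | none => best
      | some r =>
        match best with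
        | none => some r
        | some bb => if r < bb then some r else some bb) b = minOpt b (bestIdx ts) := by
  induction ts generalizing b with
  | nil => cases b <;> simp [bestIdx, minOpt]
  | cons t ts ih =>
    simp only [List.foldl_cons]
    rw [ih, step_eq, minOpt_assoc, ← bestIdx_cons]

-- ===== VERDICT (by name: the statement is the Claim_ definition above) =====
theorem pick_best_target_spec : Claim_equal_pick_best_target := by
  intro targets _
  unfold Spec_pick_best_target pick_best_target pick_best_target_alt
  rw [foldl_min]
  show _ = (match minOpt none (bestIdx targets) with
    | none => (none : Option String)
    | some b => PySem.List.pyGet? pvOrder b)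
  unfold bestIdx
  simp only [pvImageTypes, pvTextTypes, List.find?]
  split_ifs <;> simp_all <;> decide
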